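-- pv_equiv track=rewrite | github.com/allpress/wayfinder | wayfinder/browser/session.py | _host_in_scope
-- ===== SOURCE A (Python) =====
-- def _host_in_scope(host: str, allowed: list[str]) -> bool:
--     if not host:
--         return False
--     for pat in allowed:
--         p = str(pat).lower().lstrip(".")
--         if host == p or host.endswith("." + p):
--             return True
--     return False
-- ===== SOURCE B (Python) =====
-- def _host_in_scope(host: str, allowed: list[str]) -> bool:
--     if not host:
--         return False
--     pats = {str(p).lower().lstrip(".") for p in allowed}
--     if host in pats:
--         return True
--     for i, ch in enumerate(host):
--         if ch == "." and host[i + 1:] in pats: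
--             return True
--     return False
-- ===== Notes on version B (the rewrite author's own statement) =====
-- stated objective: alternative
-- what changed: B builds a set of normalized patterns once and probes it with the host's dot-suffix candidates, instead of normalizing and suffix-testing every pattern; it trades the per-pattern endswith scan for a suffix-generating loop over the host.
import Mathlib
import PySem

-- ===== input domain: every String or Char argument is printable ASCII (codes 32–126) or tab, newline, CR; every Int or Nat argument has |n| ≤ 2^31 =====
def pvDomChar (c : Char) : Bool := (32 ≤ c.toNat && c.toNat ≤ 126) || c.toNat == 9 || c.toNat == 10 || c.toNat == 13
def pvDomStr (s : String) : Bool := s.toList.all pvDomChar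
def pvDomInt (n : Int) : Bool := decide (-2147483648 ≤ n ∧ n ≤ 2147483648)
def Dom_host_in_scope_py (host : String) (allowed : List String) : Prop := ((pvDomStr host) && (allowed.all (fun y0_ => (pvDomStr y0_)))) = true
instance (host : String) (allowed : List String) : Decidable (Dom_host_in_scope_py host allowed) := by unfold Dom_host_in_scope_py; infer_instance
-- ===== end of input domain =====

-- B probes a set of normalized patterns with the host's dot-suffix candidates instead of suffix-testing each pattern (alternative decomposition, same cost in the measured regime).


-- ===== PORT A =====
-- pat.lower().lstrip(".") — lstrip with an explicit char set "." is dropWhile (· == '.') on the left (exact: Python drops leading chars from the set)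
def pvNorm (pat : String) : List Char :=
  (PySem.Chars.lower pat.toList).dropWhile (· == '.')

def host_in_scope_py (host : String) (allowed : List String) : Bool :=
  let h := host.toList
  if h = [] then false
  else
    -- for pat in allowed: early return True ≡ any
    allowed.any (fun pat =>
      let p := pvNorm pat
      h == p || PySem.Chars.endswith h ('.' :: p))

-- ===== PORT B =====
-- tails host[i+1:] for each i with host[i] == '.' (the enumerate loop of Source B, tails collected in order)
def pvDotTails : List Char → List (List Char)
  | [] => []
  | c :: cs => (if c = '.' then [cs] else []) ++ pvDotTails cs

def host_in_scope_py_alt (host : String) (allowed : List String) : Bool :=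
  let h := host.toList
  if h = [] then false
  else
    let pats : PySem.Set (List Char) := PySem.Set.ofList (allowed.map pvNorm)
    PySem.Set.contains pats h || (pvDotTails h).any (fun t => PySem.Set.contains pats t)

-- ===== PRECONDITION & SPEC =====
def Spec_host_in_scope_py (host : String) (allowed : List String) (out : Bool) : Prop := out = host_in_scope_py_alt host allowed
instance (host : String) (allowed : List String) (out : Bool) : Decidable (Spec_host_in_scope_py host allowed out) := by unfold Spec_host_in_scope_py; infer_instance

-- ===== CLAIM (what is proved, stated in full; the proofs are below) =====
def Claim_equal_host_in_scope_py : Prop := ∀ (host : String) (allowed : List String), Dom_host_in_scope_py host allowed → Spec_host_in_scope_py host allowed (host_in_scope_py host allowed)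

-- ===== LEMMAS AND PROOFS =====

-- a list is a dot-tail of h exactly when '.'-prefixed it is a suffix of h
theorem mem_pvDotTails_iff (h p : List Char) : p ∈ pvDotTails h ↔ ('.' :: p) <:+ h := by
  induction h with
  | nil => simp [pvDotTails]
  | cons c cs ih =>
    simp only [pvDotTails, List.mem_append, List.suffix_cons_iff, ih]
    constructor
    · rintro (hp | hp)
      · split_ifs at hp with hc
        · simp at hp; subst hp hc; exact Or.inl rfl
        · simp at hp
      · exact Or.inr hp
    · rintro (hp | hp)
      · cases hp; simp
      · exact Or.inr hp

theorem host_in_scope_py_spec : Claim_equal_host_in_scope_py := by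
  intro host allowed _
  unfold Spec_host_in_scope_py host_in_scope_py host_in_scope_py_alt
  by_cases hh : host.toList = []
  · simp [hh]
  · rw [if_neg hh, if_neg hh, Bool.eq_iff_iff]
    simp only [List.any_eq_true, Bool.or_eq_true, beq_iff_eq,
      PySem.Chars.endswith_iff, PySem.Set.contains, PySem.Set.mem_ofList,
      List.mem_map, mem_pvDotTails_iff, List.contains_iff_mem]
    constructor
    · rintro ⟨pat, hpat, heq | hsuf⟩
      · exact Or.inl ⟨pat, hpat, heq.symm⟩
      · exact Or.inr ⟨pvNorm pat, hsuf, pat, hpat, rfl⟩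
    · rintro (⟨pat, hpat, heq⟩ | ⟨t, hsuf, pat, hpat, ht⟩)
      · exact ⟨pat, hpat, Or.inl heq.symm⟩
      · exact ⟨pat, hpat, Or.inr (ht ▸ hsuf)⟩
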